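-- pv_equiv track=rewrite | github.com/ojhermann-ucd/comp47600 | practical2/1c.py | quote_to_words
-- ===== SOURCE A (Python) =====
-- def quote_to_words(string_input):
-- 	letters = "abcdefghijklmnopqrstuvwxyzABCDEFGHIJKLMNOPQRSTUVWXYZ "
-- 	string_output = ""
-- 	for character in string_input:
-- 		if character not in letters:
-- 			pass
-- 		else:
-- 			string_output += character
-- 	return string_output.lower()
-- ===== SOURCE B (Python) =====
-- import re
--
-- def quote_to_words(string_input):
--     return re.sub(r'[^A-Za-z ]', '', string_input).lower()
-- ===== Notes on version B (the rewrite author's own statement) =====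
-- stated objective: idiomatic
-- what changed: Replaces the explicit per-character membership loop over a 53-char letters string with a single regex substitution deleting everything outside [A-Za-z ], followed by one lower() call.
import Mathlib
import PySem

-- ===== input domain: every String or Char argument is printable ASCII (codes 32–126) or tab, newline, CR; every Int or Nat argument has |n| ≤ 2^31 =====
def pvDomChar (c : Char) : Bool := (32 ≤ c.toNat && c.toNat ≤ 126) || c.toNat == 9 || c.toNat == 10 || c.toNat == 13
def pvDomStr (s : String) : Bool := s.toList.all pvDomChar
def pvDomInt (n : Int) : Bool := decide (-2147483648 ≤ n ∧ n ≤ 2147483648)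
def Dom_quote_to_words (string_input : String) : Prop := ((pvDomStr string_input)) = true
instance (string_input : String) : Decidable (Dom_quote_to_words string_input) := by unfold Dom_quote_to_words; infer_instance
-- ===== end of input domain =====

-- B replaces A's per-character membership loop by a regex deletion of [^A-Za-z ] plus one lower(); idiomatic, return value only.

-- ===== PORT A =====
def quote_to_words (string_input : String) : String :=
  let letters := "abcdefghijklmnopqrstuvwxyzABCDEFGHIJKLMNOPQRSTUVWXYZ ".toList
  let string_output := string_input.toList.foldl
    (fun acc character => if letters.contains character then acc ++ [character] else acc) []
  String.mk (PySem.Chars.lower string_output)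

-- ===== PORT B =====
-- re.sub(r'[^A-Za-z ]', '', s) keeps exactly the chars matching the class [A-Za-z ] (exact port of the regex class), then .lower()
def quote_to_words_alt (string_input : String) : String :=
  String.mk (PySem.Chars.lower (string_input.toList.filter
    (fun c => ('A' ≤ c && c ≤ 'Z') || ('a' ≤ c && c ≤ 'z') || c == ' ')))

-- ===== PRECONDITION & SPEC =====
def Spec_quote_to_words (string_input : String) (out : String) : Prop := out = quote_to_words_alt string_input
instance (string_input : String) (out : String) : Decidable (Spec_quote_to_words string_input out) := by unfold Spec_quote_to_words; infer_instance

-- ===== CLAIM (what is proved, stated in full; the proofs are below) =====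
def Claim_equal_quote_to_words : Prop := ∀ (string_input : String), Dom_quote_to_words string_input → Spec_quote_to_words string_input (quote_to_words string_input)

-- ===== LEMMAS AND PROOFS =====
-- membership in A's letters string coincides with B's character class, for every Char
theorem pv_letters_class (c : Char) :
    ("abcdefghijklmnopqrstuvwxyzABCDEFGHIJKLMNOPQRSTUVWXYZ ".toList).contains c
      = (('A' ≤ c && c ≤ 'Z') || ('a' ≤ c && c ≤ 'z') || c == ' ') := by
  rw [Bool.eq_iff_iff]
  simp [Char.le_def, UInt32.le_iff_toNat_le, Char.ext_iff, ← UInt32.toNat_inj]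
  omega

-- ===== VERDICT (by name: the statement is the Claim_ definition above) =====
theorem quote_to_words_spec : Claim_equal_quote_to_words := by
  intro s _
  unfold Spec_quote_to_words quote_to_words quote_to_words_alt
  simp only [PySem.List.foldl_append_if_eq_filter, List.nil_append]
  congr 2
  exact List.filter_congr (fun c _ => pv_letters_class c)
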